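-- pv_equiv track=rewrite | github.com/Lincoln-LM/RNG-Python-Scripts | rng_related/misc_distance.py | xoroshiro_reseed_distance
-- ===== SOURCE A (Python) =====
-- def xoroshiro_reseed_distance(state0, state1):
--     """Efficiently calculate the distance between two states from continous xoroshiro reseeding"""
--     mask = 1
--     dist = 0
--
--     while state0 != state1:
--         if (state0 ^ state1) & mask:
--             state0 = (state0 + (0x82A2B175229D6A5B * mask)) & 0xFFFFFFFFFFFFFFFF
--             dist += mask
--         mask <<= 1
--
--     return dist
-- ===== SOURCE B (Python) =====
-- # Closed form: the per-bit reconstruction loop collapses to one modular multiplication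
-- # by the inverse of the odd constant 0x82A2B175229D6A5B mod 2**64.
-- _CINV = 0xC855099EEB5DB5D3  # == pow(0x82A2B175229D6A5B, -1, 1 << 64)
--
--
-- def xoroshiro_reseed_distance(state0, state1):
--     """Efficiently calculate the distance between two states from continous xoroshiro reseeding"""
--     return ((state1 - state0) * _CINV) % (1 << 64)
-- ===== Notes on version B (the rewrite author's own statement) =====
-- stated objective: faster
-- what changed: Replaces the 64-iteration per-bit reconstruction loop by a single closed-form modular multiplication: dist = (state1 - state0) * inverse(0x82A2B175229D6A5B) mod 2^64.
import Mathlib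
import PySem

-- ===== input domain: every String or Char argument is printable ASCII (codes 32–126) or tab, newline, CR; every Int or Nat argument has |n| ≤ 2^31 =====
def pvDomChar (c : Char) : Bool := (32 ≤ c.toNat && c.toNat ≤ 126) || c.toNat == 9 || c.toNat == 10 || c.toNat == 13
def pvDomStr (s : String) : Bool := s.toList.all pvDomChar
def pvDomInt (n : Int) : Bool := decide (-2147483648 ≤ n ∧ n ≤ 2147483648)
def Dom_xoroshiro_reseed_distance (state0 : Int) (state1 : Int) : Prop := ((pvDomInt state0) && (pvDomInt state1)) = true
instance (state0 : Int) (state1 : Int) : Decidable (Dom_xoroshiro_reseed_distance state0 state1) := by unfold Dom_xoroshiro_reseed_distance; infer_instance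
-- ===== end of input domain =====

-- B replaces A's 64-iteration per-bit reconstruction loop by one closed-form modular
-- multiplication with the inverse of the odd multiplier mod 2^64 (objective: faster —
-- a single multiply instead of the loop; both are sub-ms, below the harness's timing resolution).

-- ===== PORT A =====
-- Python `&`/`^` on int are two's-complement bitwise ops: ported as Int.land / Int.xor
-- (same semantics on all of ℤ).  `mask <<= 1` doubles mask: ported as `mask * 2`.
-- The while loop is ported with fuel; on Pre_ the loop needs at most 65 iterations
-- (mask = 2^k reaches 2^64 and the states are then equal), proved in the lemmas below.
def xrdLoop : Nat → Int → Int → Int → Int → Int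
  | 0, _, _, _, dist => dist
  | fuel+1, state0, state1, mask, dist =>
    if state0 = state1 then dist
    else if Int.land (Int.xor state0 state1) mask ≠ 0 then
      xrdLoop fuel (Int.land (state0 + 0x82A2B175229D6A5B * mask) 0xFFFFFFFFFFFFFFFF)
        state1 (mask * 2) (dist + mask)
    else
      xrdLoop fuel state0 state1 (mask * 2) dist

def xoroshiro_reseed_distance (state0 : Int) (state1 : Int) : Int :=
  xrdLoop 65 state0 state1 1 0

-- ===== PORT B =====
def xoroshiro_reseed_distance_alt (state0 : Int) (state1 : Int) : Int :=
  ((state1 - state0) * 0xC855099EEB5DB5D3) % 18446744073709551616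

-- ===== PRECONDITION & SPEC =====
-- Pre_ excludes exactly the inputs on which A's while loop never terminates:
-- state1 < 0 with state0 ≠ state1 (state0 is masked to [0, 2^64) at the first update
-- and can never equal a negative state1, so the Python loop runs forever).
def Pre_xoroshiro_reseed_distance (state0 : Int) (state1 : Int) : Prop :=
  state0 = state1 ∨ 0 ≤ state1

instance (state0 : Int) (state1 : Int) : Decidable (Pre_xoroshiro_reseed_distance state0 state1) := by
  unfold Pre_xoroshiro_reseed_distance; infer_instance

def pvWitness_xoroshiro_reseed_distance : Int × Int := (123456789, 987654321)

def Spec_xoroshiro_reseed_distance (state0 : Int) (state1 : Int) (out : Int) : Prop :=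
  out = xoroshiro_reseed_distance_alt state0 state1

instance (state0 : Int) (state1 : Int) (out : Int) : Decidable (Spec_xoroshiro_reseed_distance state0 state1 out) := by
  unfold Spec_xoroshiro_reseed_distance; infer_instance

-- ===== CLAIM (what is proved, stated in full; the proofs are below) =====
def Claim_equal_xoroshiro_reseed_distance : Prop :=
  ∀ (state0 : Int) (state1 : Int), Dom_xoroshiro_reseed_distance state0 state1 →
    Pre_xoroshiro_reseed_distance state0 state1 →
    Spec_xoroshiro_reseed_distance state0 state1 (xoroshiro_reseed_distance state0 state1)

-- ===== LEMMAS AND PROOFS =====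

theorem xrd_natBit (m k : Nat) : m.testBit k = decide (2 ^ k ≤ m % 2 ^ (k + 1)) := by
  have h1 : m.testBit k = decide (m / 2 ^ k % 2 = 1) := Nat.testBit_eq_decide_div_mod_eq
  have h2 : m % (2 ^ k * 2) = m % 2 ^ k + 2 ^ k * (m / 2 ^ k % 2) := Nat.mod_mul
  have h3 : m % 2 ^ k < 2 ^ k := Nat.mod_lt _ (Nat.two_pow_pos k)
  have h4 : (2 : Nat) ^ (k + 1) = 2 ^ k * 2 := by ring
  rw [h1, h4, h2]
  by_cases h : m / 2 ^ k % 2 = 1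
  · simp [h]
  · have h0 : m / 2 ^ k % 2 = 0 := by omega
    simp [h0]; omega

theorem xrd_negSucc_emod (m : Nat) (n : Int) (hn : 0 < n) :
    (Int.negSucc m) % n = n - 1 - (m : Int) % n := by
  have hd : (m : Int) = n * ((m : Int) / n) + (m : Int) % n := (Int.mul_ediv_add_emod _ _).symm
  have hr0 : 0 ≤ (m : Int) % n := Int.emod_nonneg _ (by omega)
  have hr1 : (m : Int) % n < n := Int.emod_lt_of_pos _ hn
  have he : (Int.negSucc m) = (n - 1 - (m : Int) % n) + n * (-((m : Int) / n + 1)) := by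
    rw [Int.negSucc_eq]; ring_nf; linarith [hd]
  rw [he, Int.add_mul_emod_self_left, Int.emod_eq_of_lt (by omega) (by omega)]

theorem xrd_intBit (x : Int) (k : Nat) :
    x.testBit k = decide ((2 ^ k : Int) ≤ x % 2 ^ (k + 1)) := by
  have hp : (0 : Int) < 2 ^ (k + 1) := by positivity
  cases x with
  | ofNat m =>
    have h1 : Int.testBit (Int.ofNat m) k = m.testBit k := rfl
    have h2 : (Int.ofNat m) % (2 ^ (k + 1) : Int) = ((m % 2 ^ (k + 1) : Nat) : Int) := by
      push_cast [Int.ofNat_eq_natCast]; rfl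
    rw [h1, h2, xrd_natBit]
    by_cases h : 2 ^ k ≤ m % 2 ^ (k + 1)
    · simp only [h, decide_true]
      symm; simp only [decide_eq_true_eq]
      exact_mod_cast h
    · simp only [h, decide_false]
      symm; simp only [decide_eq_false_iff_not, not_le]
      exact_mod_cast Nat.lt_of_not_le h
  | negSucc m =>
    have h1 : Int.testBit (Int.negSucc m) k = !(m.testBit k) := rfl
    have h2 : (Int.negSucc m) % (2 ^ (k + 1) : Int)
        = 2 ^ (k + 1) - 1 - ((m % 2 ^ (k + 1) : Nat) : Int) := by
      rw [xrd_negSucc_emod m _ hp]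
      norm_cast
    rw [h1, h2, xrd_natBit]
    have hb : m % 2 ^ (k + 1) < 2 ^ (k + 1) := Nat.mod_lt _ (Nat.two_pow_pos _)
    have hkk : (2 : Int) ^ (k + 1) = 2 ^ k * 2 := by ring
    have hkn : (2 : Nat) ^ (k + 1) = 2 ^ k * 2 := by ring
    by_cases h : 2 ^ k ≤ m % 2 ^ (k + 1)
    · simp only [h, decide_true, Bool.not_true]
      symm; simp only [decide_eq_false_iff_not, not_le]
      have : (2 ^ k : Int) ≤ ((m % 2 ^ (k + 1) : Nat) : Int) := by exact_mod_cast h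
      omega
    · simp only [h, decide_false, Bool.not_false]
      symm; simp only [decide_eq_true_eq]
      have : ((m % 2 ^ (k + 1) : Nat) : Int) < 2 ^ k := by exact_mod_cast Nat.lt_of_not_le h
      have hbi : ((m % 2 ^ (k + 1) : Nat) : Int) < 2 ^ (k + 1) := by exact_mod_cast hb
      omega

theorem xrd_land_nonneg (x : Int) (n : Nat) : 0 ≤ Int.land x (n : Int) := by
  cases x with
  | ofNat m => exact Int.ofNat_nonneg _
  | negSucc m => exact Int.ofNat_nonneg _

theorem xrd_land_pow_eq_zero (x : Int) (k : Nat) :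
    Int.land x ((2 ^ k : Nat) : Int) = 0 ↔ x.testBit k = false := by
  cases x with
  | ofNat m =>
    have h1 : Int.land (Int.ofNat m) ((2 ^ k : Nat) : Int) = ((m &&& 2 ^ k : Nat) : Int) := rfl
    have h2 : Int.testBit (Int.ofNat m) k = m.testBit k := rfl
    rw [h1, h2, Nat.and_two_pow]
    cases m.testBit k <;> simp
  | negSucc m =>
    have h1 : Int.land (Int.negSucc m) ((2 ^ k : Nat) : Int) = ((Nat.ldiff (2 ^ k) m : Nat) : Int) := rfl
    have h2 : Int.testBit (Int.negSucc m) k = !(m.testBit k) := rfl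
    rw [h1, h2]
    constructor
    · intro h
      have h0 : Nat.ldiff (2 ^ k) m = 0 := by exact_mod_cast h
      have := Nat.testBit_ldiff (2 ^ k) m k
      rw [h0, Nat.zero_testBit, Nat.testBit_two_pow_self] at this
      simp at this ⊢
      exact this
    · intro h
      have hm : m.testBit k = true := by simpa using h
      have h0 : Nat.ldiff (2 ^ k) m = 0 := by
        apply Nat.eq_of_testBit_eq
        intro i
        rw [Nat.testBit_ldiff, Nat.zero_testBit]
        by_cases hik : i = k
        · subst hik; simp [hm]
        · simp [Nat.testBit_two_pow, hik]
          intro h'; exact absurd h'.symm hik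
      rw [h0]; rfl

theorem xrd_bit_test (s0 s1 : Int) (k : Nat) (h : ((2 ^ k : Nat) : Int) ∣ s1 - s0) :
    Int.land (Int.xor s0 s1) ((2 ^ k : Nat) : Int) = 0 ↔ ((2 ^ (k + 1) : Nat) : Int) ∣ s1 - s0 := by
  rw [xrd_land_pow_eq_zero, Int.testBit_lxor]
  have hb0 := xrd_intBit s0 k
  have hb1 := xrd_intBit s1 k
  have hpk : (0 : Int) < 2 ^ k := by positivity
  have hp1 : (0 : Int) < 2 ^ (k + 1) := by positivity
  set a := s0 % 2 ^ (k + 1) with ha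
  set b := s1 % 2 ^ (k + 1) with hbdef
  have ha0 : 0 ≤ a := Int.emod_nonneg _ (by omega)
  have ha1 : a < 2 ^ (k + 1) := Int.emod_lt_of_pos _ hp1
  have hb0' : 0 ≤ b := Int.emod_nonneg _ (by omega)
  have hb1' : b < 2 ^ (k + 1) := Int.emod_lt_of_pos _ hp1
  -- low k bits agree
  have hdvd : (2 ^ k : Int) ∣ b - a := by
    have h1 : (2 ^ k : Int) ∣ (2 ^ (k + 1) : Int) := pow_dvd_pow 2 (by omega)
    have h2 : b - a = (s1 - s0) - 2 ^ (k + 1) * ((s1 / 2 ^ (k + 1)) - (s0 / 2 ^ (k + 1))) := by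
      rw [ha, hbdef, Int.emod_def, Int.emod_def]; ring
    rw [h2]
    exact dvd_sub (by exact_mod_cast h) (Dvd.dvd.mul_right h1 _)
  -- the RHS is a = b
  have habs : ∀ z : Int, (2 ^ (k+1) : Int) ∣ z → -(2^(k+1)) < z → z < 2^(k+1) → z = 0 := by
    intro z hz h1 h2
    exact Int.eq_zero_of_abs_lt_dvd hz (abs_lt.mpr ⟨h1, h2⟩)
  have hrhs : (((2 ^ (k + 1) : Nat) : Int) ∣ s1 - s0) ↔ a = b := by
    push_cast
    constructor
    · intro hd
      have h2 : b - a = (s1 - s0) - 2 ^ (k + 1) * ((s1 / 2 ^ (k + 1)) - (s0 / 2 ^ (k + 1))) := by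
        rw [ha, hbdef, Int.emod_def, Int.emod_def]; ring
      have hdd : (2 ^ (k+1) : Int) ∣ b - a := by
        rw [h2]; exact dvd_sub hd (Dvd.dvd.mul_right (dvd_refl _) _)
      have := habs _ hdd (by omega) (by omega)
      omega
    · intro hab
      have h2 : s1 - s0 = (b - a) + 2 ^ (k + 1) * ((s1 / 2 ^ (k + 1)) - (s0 / 2 ^ (k + 1))) := by
        rw [ha, hbdef, Int.emod_def, Int.emod_def]; ring
      rw [h2, ← hab]
      simpa using Dvd.dvd.mul_right (dvd_refl ((2:Int) ^ (k+1))) _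
  rw [hrhs, hb0, hb1]
  obtain ⟨t, ht⟩ := hdvd
  have hk2 : (2 : Int) ^ (k + 1) = 2 ^ k * 2 := by ring
  have ht2 : t = -1 ∨ t = 0 ∨ t = 1 := by
    have h1 : -2 < t := by nlinarith
    have h2 : t < 2 := by nlinarith
    omega
  rw [hk2] at ha1 hb1'
  rcases ht2 with h|h|h <;> subst h <;>
    by_cases hxa : (2 ^ k : Int) ≤ a <;> by_cases hxb : (2 ^ k : Int) ≤ b <;>
      simp [hxa, hxb] <;> omega

theorem xrd_testBit_natCast (n : Nat) (i : Nat) : ((n : Int)).testBit i = n.testBit i := rfl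

theorem xrd_toNat_testBit (z : Int) (hz : 0 ≤ z) (i : Nat) : z.toNat.testBit i = z.testBit i := by
  cases z with
  | ofNat m => rfl
  | negSucc m => exact absurd hz (by simp [Int.negSucc_eq]; omega)

theorem xrd_mask_eq (x : Int) : Int.land x 0xFFFFFFFFFFFFFFFF = x % 18446744073709551616 := by
  have hM : (0xFFFFFFFFFFFFFFFF : Int) = ((2 ^ 64 - 1 : Nat) : Int) := by norm_num
  have hMM : (18446744073709551616 : Int) = 2 ^ 64 := by norm_num
  have hL0 : 0 ≤ Int.land x ((2 ^ 64 - 1 : Nat) : Int) := xrd_land_nonneg x _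
  have hR0 : 0 ≤ x % (18446744073709551616 : Int) := Int.emod_nonneg _ (by norm_num)
  rw [hM]
  have key : (Int.land x ((2 ^ 64 - 1 : Nat) : Int)).toNat = (x % 18446744073709551616).toNat := by
    apply Nat.eq_of_testBit_eq
    intro i
    rw [xrd_toNat_testBit _ hL0, xrd_toNat_testBit _ hR0, Int.testBit_land,
      xrd_testBit_natCast, Nat.testBit_two_pow_sub_one]
    by_cases hi : i < 64
    · have hdvd : (2 ^ (i + 1) : Int) ∣ 18446744073709551616 := by
        rw [hMM]; exact pow_dvd_pow 2 (by omega)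
      rw [xrd_intBit (x % 18446744073709551616) i, Int.emod_emod_of_dvd x hdvd, ← xrd_intBit x i]
      simp [hi]
    · have hlt : x % 18446744073709551616 < 2 ^ 64 := by
        rw [← hMM]; exact Int.emod_lt_of_pos _ (by norm_num)
      have hfalse : Int.testBit (x % 18446744073709551616) i = false := by
        rw [← xrd_toNat_testBit _ hR0]
        apply Nat.testBit_lt_two_pow
        calc (x % 18446744073709551616).toNat < 2 ^ 64 := by omega
        _ ≤ 2 ^ i := Nat.pow_le_pow_right (by norm_num) (by omega)
      rw [hfalse]
      simp [hi]
  omega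

theorem xrd_loop_eq : ∀ (j k : Nat), k + j = 64 → ∀ (s0 s1 dist : Int),
    0 ≤ s1 → s1 < 2 ^ 64 → -(2 ^ 64) < s1 - s0 → s1 - s0 < 2 ^ 64 →
    ((2 ^ k : Nat) : Int) ∣ s1 - s0 →
    xrdLoop (j + 1) s0 s1 ((2 ^ k : Nat) : Int) dist
      = dist + ((s1 - s0) * 0xC855099EEB5DB5D3) % 18446744073709551616 := by
  intro j
  induction j with
  | zero =>
    intro k hk s0 s1 dist h1 h2 h3 h4 hdvd
    have hk64 : k = 64 := by omega
    subst hk64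
    have hdvd' : ((2 : Int) ^ 64) ∣ s1 - s0 := by exact_mod_cast hdvd
    have h0 : s1 - s0 = 0 := Int.eq_zero_of_abs_lt_dvd hdvd' (abs_lt.mpr ⟨h3, h4⟩)
    have hs : s0 = s1 := by omega
    subst hs
    simp [xrdLoop]
  | succ j ih =>
    intro k hk s0 s1 dist h1 h2 h3 h4 hdvd
    by_cases heq : s0 = s1
    · subst heq
      simp [xrdLoop]
    · have hp : ((2 ^ k : Nat) : Int) = 2 ^ k := by push_cast; ring
      have hp0 : (0 : Int) ≤ ((2 ^ k : Nat) : Int) := by positivity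
      have hkle : k + 1 ≤ 64 := by omega
      have hMM : (18446744073709551616 : Int) = 2 ^ 64 := by norm_num
      have hpM : ((2 ^ k : Nat) : Int) ∣ (18446744073709551616 : Int) := by
        rw [hMM, hp]; exact pow_dvd_pow 2 (by omega)
      have hp2M : ((2 ^ (k + 1) : Nat) : Int) ∣ (18446744073709551616 : Int) := by
        rw [hMM, show ((2 ^ (k + 1) : Nat) : Int) = 2 ^ (k + 1) from by push_cast; ring]
        exact pow_dvd_pow 2 hkle
      have hm2 : ((2 ^ k : Nat) : Int) * 2 = ((2 ^ (k + 1) : Nat) : Int) := by push_cast; ring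
      show (if s0 = s1 then dist
            else if Int.land (Int.xor s0 s1) ((2 ^ k : Nat) : Int) ≠ 0 then
              xrdLoop (j + 1) (Int.land (s0 + 0x82A2B175229D6A5B * ((2 ^ k : Nat) : Int)) 0xFFFFFFFFFFFFFFFF)
                s1 (((2 ^ k : Nat) : Int) * 2) (dist + ((2 ^ k : Nat) : Int))
            else xrdLoop (j + 1) s0 s1 (((2 ^ k : Nat) : Int) * 2) dist) = _
      rw [if_neg heq]
      by_cases hbit : Int.land (Int.xor s0 s1) ((2 ^ k : Nat) : Int) = 0
      · rw [if_neg (not_not_intro hbit), hm2]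
        exact ih (k + 1) (by omega) s0 s1 dist h1 h2 h3 h4 ((xrd_bit_test s0 s1 k hdvd).mp hbit)
      · have hdvd2 : ¬ ((2 ^ (k + 1) : Nat) : Int) ∣ s1 - s0 :=
          fun h => hbit ((xrd_bit_test s0 s1 k hdvd).mpr h)
        rw [if_pos hbit, hm2, xrd_mask_eq]
        set p : Int := ((2 ^ k : Nat) : Int) with hpdef
        set p2 : Int := ((2 ^ (k + 1) : Nat) : Int) with hp2def
        set M : Int := (18446744073709551616 : Int) with hMdef
        set C : Int := (0x82A2B175229D6A5B : Int) with hCdef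
        set CI : Int := (0xC855099EEB5DB5D3 : Int) with hCIdef
        have hMpos : (0 : Int) < M := by rw [hMdef]; norm_num
        have hCCI : C * CI = M * 7366340402333436072 + 1 := by
          rw [hCdef, hCIdef, hMdef]; norm_num
        have hCval : C = 2 * 4706640643903894829 + 1 := by rw [hCdef]; norm_num
        set Q : Int := (s0 + C * p) / M with hQdef
        set s0' : Int := (s0 + C * p) % M with hs0'def
        have hq : s0' = s0 + C * p - M * Q := by rw [hs0'def, hQdef, Int.emod_def]
        have hs0'0 : 0 ≤ s0' := Int.emod_nonneg _ (by omega)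
        have hs0'M : s0' < M := Int.emod_lt_of_pos _ hMpos
        obtain ⟨t, ht⟩ := hdvd
        obtain ⟨u, hu⟩ : ∃ u, t = 2 * u + 1 := by
          rcases Int.even_or_odd t with he | ho
          · obtain ⟨w, hw⟩ := he
            exact absurd (⟨w, by rw [ht, hw, ← hm2]; ring⟩ : p2 ∣ s1 - s0) hdvd2
          · exact ho
        obtain ⟨v, hv⟩ := hp2M
        have hdvd' : p2 ∣ s1 - s0' :=
          ⟨(u - 4706640643903894829) + v * Q, by
            linear_combination ht - hq + p * hu + Q * hv + (u - 4706640643903894829) * hm2 - p * hCval⟩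
        have h3' : -(2 ^ 64) < s1 - s0' := by rw [hMdef] at hs0'M; omega
        have h4' : s1 - s0' < 2 ^ 64 := by omega
        rw [ih (k + 1) (by omega) s0' s1 (dist + p) h1 h2 h3' h4' hdvd']
        -- arithmetic: p + ((s1 - s0') * CI) % M = ((s1 - s0) * CI) % M
        set X : Int := (s1 - s0) * CI with hXdef
        have hY : (s1 - s0') * CI = (X - p) + M * (Q * CI - 7366340402333436072 * p) := by
          linear_combination (-CI) * hq - hXdef - p * hCCI
        have hXmod0 : 0 ≤ X % M := Int.emod_nonneg _ (by omega)
        have hXmodM : X % M < M := Int.emod_lt_of_pos _ hMpos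
        have hXne : X % M ≠ 0 := by
          intro h0
          have hMX : M ∣ X := Int.dvd_of_emod_eq_zero h0
          have hXC : s1 - s0 = X * C - M * ((s1 - s0) * 7366340402333436072) := by
            linear_combination (-C) * hXdef - (s1 - s0) * hCCI
          have hMd : M ∣ s1 - s0 := by
            rw [hXC]
            exact dvd_sub (hMX.mul_right C) (Dvd.dvd.mul_right (dvd_refl M) _)
          have h0' : s1 - s0 = 0 :=
            Int.eq_zero_of_abs_lt_dvd hMd (abs_lt.mpr ⟨hMM ▸ h3, hMM ▸ h4⟩)
          exact heq (by omega)
        have hpX : p ∣ X % M := by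
          have hdX : p ∣ X := ⟨t * CI, by linear_combination hXdef + CI * ht⟩
          rw [Int.emod_def X M]
          exact dvd_sub hdX (hpM.mul_right _)
        have hple : p ≤ X % M := Int.le_of_dvd (by omega) hpX
        have hsub : (X - p) % M = X % M - p := by
          rw [Int.sub_emod, Int.emod_eq_of_lt hp0 (by omega), Int.emod_eq_of_lt (by omega) (by omega)]
        rw [hY, Int.add_mul_emod_self_left, hsub]
        ring

-- ===== VERDICT (by name: the statement is the Claim_ definition above) =====
theorem xoroshiro_reseed_distance_spec : Claim_equal_xoroshiro_reseed_distance := by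
  intro s0 s1 hdom hpre
  unfold Spec_xoroshiro_reseed_distance xoroshiro_reseed_distance xoroshiro_reseed_distance_alt
  by_cases heq : s0 = s1
  · subst heq
    simp [xrdLoop]
  · have h1 : 0 ≤ s1 := by
      rcases hpre with h | h
      · exact absurd h heq
      · exact h
    have hdom' : (-2147483648 ≤ s0 ∧ s0 ≤ 2147483648) ∧ -2147483648 ≤ s1 ∧ s1 ≤ 2147483648 := by
      simpa [Dom_xoroshiro_reseed_distance, pvDomInt] using hdom
    obtain ⟨⟨hb1, hb2⟩, hb3, hb4⟩ := hdom'
    have h2 : s1 < 2 ^ 64 := by norm_num; omega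
    have h3 : -(2 ^ 64) < s1 - s0 := by norm_num; omega
    have h4 : s1 - s0 < 2 ^ 64 := by norm_num; omega
    have hdvd : ((2 ^ 0 : Nat) : Int) ∣ s1 - s0 := by norm_num
    have := xrd_loop_eq 64 0 (by norm_num) s0 s1 0 h1 h2 h3 h4 hdvd
    norm_num at this
    exact this
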